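-- pv_equiv track=rewrite | github.com/Adam-Jimenez/binarysearch-editorials | Gene Mutation Groups.py | solve
-- ===== SOURCE A (Python) =====
-- from collections import Counter,defaultdict
--
-- def solve(genes):
--     comp=defaultdict(list)
--     for gene in genes:
--         for i in range(len(gene)):
--             left=gene[:i]
--             right=gene[i+1:]
--             comp[(left,right)].append(gene)
--     seen=set()
--     ans=0
--     def dfs(gene):
--         for i in range(len(gene)):
--             left=gene[:i]
--             right=gene[i+1:]
--             for nei in comp[(left,right)]:
--                 if nei not in seen:
--                     seen.add(nei)
--                     dfs(nei)
--     for gene in genes: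
--         if gene not in seen:
--             ans+=1
--             seen.add(gene)
--             dfs(gene)
--     return ans
-- ===== SOURCE B (Python) =====
-- from collections import defaultdict
--
-- def solve(genes):
--     # partition refinement: rep maps each distinct gene to its class label, cls maps each
--     # class label to the list of its members; every wildcard-key bucket merges the classes
--     # of its members into the first member's class; answer = number of distinct labels.
--     rep = {g: g for g in genes}
--     cls = {g: [g] for g in genes}
--     buckets = defaultdict(list)
--     for g in rep:
--         for i in range(len(g)):
--             buckets[(g[:i], g[i + 1:])].append(g)
--     for members in buckets.values():
--         r = rep[members[0]]
--         for g in members[1:]: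
--             r2 = rep[g]
--             if r2 != r:
--                 for k in cls[r2]:
--                     rep[k] = r
--                 cls[r].extend(cls[r2])
--                 del cls[r2]
--     return len(set(rep.values()))
-- ===== Notes on version B (the rewrite author's own statement) =====
-- stated objective: alternative
-- what changed: A counts components by recursive DFS over a wildcard-key adjacency dict with a global seen-set; B instead runs partition refinement: every distinct gene starts as its own class, each wildcard-key bucket merges its members' classes into the first member's class (relabelling only the absorbed class's member list), and the answer is the number of distinct final labels.
import Mathlib
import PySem

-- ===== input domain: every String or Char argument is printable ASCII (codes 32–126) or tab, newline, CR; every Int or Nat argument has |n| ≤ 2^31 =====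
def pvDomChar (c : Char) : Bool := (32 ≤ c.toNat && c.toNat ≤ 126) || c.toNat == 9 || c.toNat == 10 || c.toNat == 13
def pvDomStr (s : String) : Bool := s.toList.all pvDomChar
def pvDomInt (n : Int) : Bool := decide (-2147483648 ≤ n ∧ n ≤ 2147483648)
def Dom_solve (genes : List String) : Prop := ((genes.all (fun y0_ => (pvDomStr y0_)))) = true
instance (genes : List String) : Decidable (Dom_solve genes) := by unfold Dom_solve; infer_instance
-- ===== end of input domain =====

-- B replaces A's recursive DFS component count by partition refinement over the same wildcard-key
-- buckets: one relabelling merge per bucket, then counting distinct class labels (objective: alternative).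


-- ===== PORT A =====
-- key of a gene at split position i: (gene[:i], gene[i+1:]) — this expression appears verbatim in both Pythons


def keyP (g : String) (i : Int) : String × String :=
  (PySem.Str.slice g none (some i), PySem.Str.slice g (some (i+1)) none)


-- A's comp-building loop (B's bucket-building loop is the same loop, run on the distinct genes)

def buildComp (xs : List String) : PySem.Dict (String × String) (List String) :=
  xs.foldl (fun comp gene =>
    (PySem.List.pyRange 0 (PySem.Str.len gene)).foldl (fun comp i =>
      comp.modify (keyP gene i) [] (· ++ [gene])) comp) PySem.Dict.empty


-- A's recursive dfs; the fuel (called with len(genes), strictly more than the possible recursion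
-- depth, since every recursive call first adds an unseen gene to seen) only makes it total

def dfsA (comp : PySem.Dict (String × String) (List String)) :
    Nat → String → PySem.Set String → PySem.Set String
  | 0, _, seen => seen
  | fuel+1, gene, seen =>
    (PySem.List.pyRange 0 (PySem.Str.len gene)).foldl (fun seen i =>
      (comp.getD (keyP gene i) []).foldl (fun seen nei =>
        if nei ∈ seen then seen else dfsA comp fuel nei (PySem.Set.add seen nei)) seen) seen

def solve (genes : List String) : Int :=
  let comp := buildComp genes
  (genes.foldl (fun (st : PySem.Set String × Int) gene =>
    if gene ∈ st.1 then st
    else (dfsA comp genes.length gene (PySem.Set.add st.1 gene), st.2 + 1))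
    (PySem.Set.empty, 0)).2


-- ===== PORT B =====
-- 'for k in cls[src_label]: rep[k] = dst' — relabel the members of one class

def clsRelabel (rep : PySem.Dict String String) (members : List String) (dst : String) :
    PySem.Dict String String :=
  members.foldl (fun rep k => rep.insert k dst) rep

-- body of the merge loop: if g's label differs from r, fold g's whole class into the class r
def mergeStep (r : String)
    (st : PySem.Dict String String × PySem.Dict String (List String)) (g : String) :
    PySem.Dict String String × PySem.Dict String (List String) :=
  if st.1.getD g "" ≠ r then
    (clsRelabel st.1 (st.2.getD (st.1.getD g "") []) r,
     (st.2.modify r [] (· ++ st.2.getD (st.1.getD g "") [])).erase (st.1.getD g ""))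
  else st

-- the loop 'for g in members[1:]: ...' with r fixed at the group's start
def mergeRun (st : PySem.Dict String String × PySem.Dict String (List String))
    (r : String) (rest : List String) :
    PySem.Dict String String × PySem.Dict String (List String) :=
  rest.foldl (mergeStep r) st

def mergeGroup (st : PySem.Dict String String × PySem.Dict String (List String))
    (members : List String) :
    PySem.Dict String String × PySem.Dict String (List String) :=
  match members with
  | [] => st  -- unreachable: bucket lists are built nonempty; "" defaults likewise only for totality
  | m0 :: rest => mergeRun st (st.1.getD m0 "") rest

def solve_alt (genes : List String) : Int :=
  let rep0 : PySem.Dict String String := genes.foldl (fun d g => d.insert g g) PySem.Dict.empty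
  let cls0 : PySem.Dict String (List String) :=
    genes.foldl (fun d g => d.insert g [g]) PySem.Dict.empty
  let buckets := buildComp rep0.keys
  let fin := buckets.values.foldl mergeGroup (rep0, cls0)
  ((PySem.Set.ofList fin.1.values).length : Int)

-- ===== PRECONDITION & SPEC =====
def Spec_solve (genes : List String) (out : Int) : Prop := out = solve_alt genes
instance (genes : List String) (out : Int) : Decidable (Spec_solve genes out) := by unfold Spec_solve; infer_instance

-- ===== CLAIM (what is proved, stated in full; the proofs are below) =====
def Claim_equal_solve : Prop := ∀ (genes : List String), Dom_solve genes → Spec_solve genes (solve genes)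

-- ===== LEMMAS AND PROOFS =====
-- The common specification: the one-mutation graph on the genes (two genes are adjacent iff they
-- share a (left, right) wildcard key), its connectivity 'conn', and the component count 'cCount'.
-- PORT A is shown to equal cCount (solveA), PORT B as well (solveB, via the label-class
-- characterisation repF_spec of the merged dictionary), giving final_eq.

def keysL (g : String) : List (String × String) :=
  (PySem.List.pyRange 0 (PySem.Str.len g)).map (keyP g)

def pairsOf (xs : List String) : List ((String × String) × String) :=
  xs.flatMap (fun g => (keysL g).map (fun k => (k, g)))

theorem buildComp_eq_pairs (xs : List String) :
    buildComp xs = (pairsOf xs).foldl (fun d p => d.modify p.1 [] (· ++ [p.2])) PySem.Dict.empty := by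
  suffices h : ∀ (ys : List String) (d : PySem.Dict (String × String) (List String)),
      ys.foldl (fun comp gene =>
        (PySem.List.pyRange 0 (PySem.Str.len gene)).foldl (fun comp i =>
          comp.modify (keyP gene i) [] (· ++ [gene])) comp) d
      = (pairsOf ys).foldl (fun d p => d.modify p.1 [] (· ++ [p.2])) d by
    exact h xs _
  intro ys
  induction ys with
  | nil => intro d; simp [pairsOf]
  | cons g t ih =>
    intro d
    simp only [List.foldl_cons, pairsOf, List.flatMap_cons, List.foldl_append, ih]
    congr 1
    rw [List.foldl_map, keysL, List.foldl_map]

theorem comp_mem {xs : List String} {k : String × String} {x : String} :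
    x ∈ (buildComp xs).getD k [] ↔ x ∈ xs ∧ k ∈ keysL x := by
  rw [buildComp_eq_pairs, PySem.Dict.getD_foldl_modify_append]
  simp only [PySem.Dict.getD_empty, List.nil_append, List.mem_map, List.mem_filter, pairsOf,
    List.mem_flatMap, beq_iff_eq]
  constructor
  · rintro ⟨⟨k', g⟩, ⟨⟨g', hg', ⟨kk, hkk, heq⟩⟩, hkeq⟩, rfl⟩
    obtain ⟨h1, h2⟩ := Prod.ext_iff.mp heq
    simp only at h1 h2; subst h1; subst h2; subst hkeq
    exact ⟨hg', hkk⟩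
  · rintro ⟨hx, hk⟩
    exact ⟨(k, x), ⟨⟨x, hx, ⟨k, hk, rfl⟩⟩, rfl⟩, rfl⟩

theorem comp_keys_nodup (xs : List String) : (buildComp xs).keys.Nodup := by
  rw [buildComp_eq_pairs]
  exact PySem.Dict.nodup_keys_foldl_modify_key (pairsOf xs) (fun p => p.1) []
    (fun _ p v => v ++ [p.2]) PySem.Dict.empty (by simp [PySem.Dict.keys_empty])

theorem comp_keys_mem {xs : List String} {k : String × String} :
    k ∈ (buildComp xs).keys ↔ ∃ g ∈ xs, k ∈ keysL g := by
  rw [buildComp_eq_pairs,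
    PySem.Dict.keys_foldl_modify_key (pairsOf xs) (fun p => p.1) [] (fun _ p v => v ++ [p.2])]
  rw [show (PySem.Dict.empty : PySem.Dict (String × String) (List String)).keys = ([] : PySem.Set (String × String)) from rfl, PySem.Set.mem_update]
  simp only [List.not_mem_nil, false_or, List.mem_map, pairsOf, List.mem_flatMap]
  constructor
  · rintro ⟨p, ⟨g, hg, ⟨kk, hkk, heq⟩⟩, rfl⟩
    subst heq
    exact ⟨g, hg, hkk⟩
  · rintro ⟨g, hg, hk⟩
    exact ⟨(k, g), ⟨g, hg, ⟨k, hk, rfl⟩⟩, rfl⟩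

def adjK (a b : String) : Prop := ∃ k, k ∈ keysL a ∧ k ∈ keysL b

def stepG (genes : List String) (a b : String) : Prop := a ∈ genes ∧ b ∈ genes ∧ adjK a b

def conn (genes : List String) : String → String → Prop := Relation.ReflTransGen (stepG genes)

def innerF (comp : PySem.Dict (String × String) (List String)) (fuel : Nat)
    (s : PySem.Set String) (n : String) : PySem.Set String :=
  if n ∈ s then s else dfsA comp fuel n (PySem.Set.add s n)

theorem dfsA_succ (comp : PySem.Dict (String × String) (List String)) (fuel : Nat)
    (g : String) (s : PySem.Set String) :
    dfsA comp (fuel+1) g s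
      = (keysL g).foldl (fun s k => (comp.getD k []).foldl (innerF comp fuel) s) s := by
  simp only [dfsA, keysL, List.foldl_map]
  rfl

theorem foldl_pfx {α β : Type} {f : List α → β → List α} {l : List β} {s : List α}
    (h : ∀ t x, x ∈ l → t <+: f t x) : s <+: l.foldl f s := by
  induction l generalizing s with
  | nil => exact List.prefix_refl s
  | cons x t ih =>
    exact (h s x (by simp)).trans (ih (fun t' y hy => h t' y (by simp [hy])))

theorem dfsA_pfx (comp : PySem.Dict (String × String) (List String)) :
    ∀ fuel (g : String) (s : PySem.Set String), s <+: dfsA comp fuel g s := by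
  intro fuel
  induction fuel with
  | zero => intro g s; exact List.prefix_refl s
  | succ fuel ih =>
    intro g s
    rw [dfsA_succ]
    refine foldl_pfx (fun t k _ => foldl_pfx (fun t' n _ => ?_))
    unfold innerF
    by_cases hn : n ∈ t'
    · simp [hn]
    · simp only [hn, if_false]
      calc t' <+: PySem.Set.add t' n := by
             rw [PySem.Set.add_of_not_mem hn]; exact List.prefix_append _ _
        _ <+: _ := ih n (PySem.Set.add t' n)

theorem innerF_pfx (comp : PySem.Dict (String × String) (List String)) (fuel : Nat)
    (s : PySem.Set String) (n : String) : s <+: innerF comp fuel s n := by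
  unfold innerF
  by_cases hn : n ∈ s
  · simp [hn]
  · simp only [hn, if_false]
    calc s <+: PySem.Set.add s n := by
           rw [PySem.Set.add_of_not_mem hn]; exact List.prefix_append _ _
      _ <+: _ := dfsA_pfx comp fuel n (PySem.Set.add s n)

theorem dfsA_sound (genes : List String) :
    ∀ fuel (g : String) (s : PySem.Set String), g ∈ genes →
      ∀ x ∈ dfsA (buildComp genes) fuel g s, x ∈ s ∨ conn genes g x := by
  intro fuel
  induction fuel with
  | zero => intro g s _ x hx; exact Or.inl hx
  | succ fuel ih =>
    intro g s hg
    rw [dfsA_succ]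
    refine List.foldlRecOn (motive := fun T => ∀ x ∈ T, x ∈ s ∨ conn genes g x) _ _ (fun x hx => Or.inl hx) ?_
    intro T hT k hk
    refine List.foldlRecOn (motive := fun T => ∀ x ∈ T, x ∈ s ∨ conn genes g x) _ _ hT ?_
    intro T' hT' nei hnei
    unfold innerF
    by_cases hmem : nei ∈ T'
    · simpa [hmem] using hT'
    · simp only [hmem, if_false]
      intro x hx
      obtain ⟨hneig, hneik⟩ := comp_mem.mp hnei
      have hstep : stepG genes g nei := ⟨hg, hneig, ⟨k, hk, hneik⟩⟩
      rcases ih nei (PySem.Set.add T' nei) hneig x hx with hx' | hconn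
      · rcases (PySem.Set.mem_add T' nei x).mp hx' with hx'' | rfl
        · exact hT' x hx''
        · exact Or.inr (Relation.ReflTransGen.single hstep)
      · exact Or.inr ((Relation.ReflTransGen.single hstep).trans hconn)

def remC (genes : List String) (s : PySem.Set String) : Nat :=
  List.countP (fun x => !(decide (x ∈ s))) (PySem.Set.ofList genes)

theorem countP_lt_countP {α : Type} {l : List α} {p q : α → Bool}
    (hpq : ∀ x ∈ l, p x = true → q x = true) {a : α} (ha : a ∈ l)
    (hqa : q a = true) (hpa : ¬ p a = true) : List.countP p l < List.countP q l := by
  induction l with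
  | nil => cases ha
  | cons x t ih =>
    simp only [List.countP_cons]
    rcases List.mem_cons.mp ha with rfl | hat
    · have hle : List.countP p t ≤ List.countP q t :=
        List.countP_mono_left (fun y hy => hpq y (by simp [hy]))
      have hpx : p a = false := by simpa using hpa
      simp [hpx, hqa]
      omega
    · have h1 := ih (fun y hy h => hpq y (by simp [hy]) h) hat
      have hx : p x = true → q x = true := hpq x (by simp)
      by_cases hpx : p x = true
      · simp [hpx, hx hpx]; omega
      · by_cases hqx : q x = true <;> simp [hpx, hqx] <;> omega

theorem remC_anti {genes : List String} {s t : PySem.Set String}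
    (hsub : ∀ x ∈ s, x ∈ t) : remC genes t ≤ remC genes s := by
  refine List.countP_mono_left (fun x _ h => ?_)
  simp only [Bool.not_eq_eq_eq_not, Bool.not_true, decide_eq_false_iff_not] at h ⊢
  exact fun hxs => h (hsub x hxs)

theorem remC_add_lt {genes : List String} {s : PySem.Set String} {n : String}
    (hn : n ∈ genes) (hns : n ∉ s) : remC genes (PySem.Set.add s n) < remC genes s := by
  unfold remC
  refine countP_lt_countP (fun x _ h => ?_) ((PySem.Set.mem_ofList genes n).mpr hn) ?_ ?_
  · simp only [Bool.not_eq_eq_eq_not, Bool.not_true, decide_eq_false_iff_not] at h ⊢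
    intro hxs
    exact h ((PySem.Set.mem_add s n x).mpr (Or.inl hxs))
  · simp [hns]
  · simp [PySem.Set.mem_add]

theorem remC_lt_len {genes : List String} {s : PySem.Set String} {n : String}
    (hn : n ∈ genes) (hns : n ∈ s) : remC genes s < genes.length := by
  have h1 : remC genes s < List.countP (fun _ => true) (PySem.Set.ofList genes) := by
    unfold remC
    refine countP_lt_countP (fun x _ _ => rfl) ((PySem.Set.mem_ofList genes n).mpr hn) rfl (by simp [hns])
  have h2 := PySem.Set.length_ofList_le (xs := genes)
  simp only [List.countP_true] at h1
  omega

theorem dfsA_closure (genes : List String) :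
    ∀ fuel (g : String) (s : PySem.Set String),
    g ∈ genes → g ∈ s → remC genes s < fuel →
    (∀ y, y ∈ genes → adjK g y → y ∈ dfsA (buildComp genes) fuel g s) ∧
    (∀ x, x ∈ dfsA (buildComp genes) fuel g s → x ∉ s →
      x ∈ genes ∧ ∀ y, y ∈ genes → adjK x y → y ∈ dfsA (buildComp genes) fuel g s) := by
  intro fuel
  induction fuel with
  | zero => intro g s _ _ h; exact absurd h (Nat.not_lt_zero _)
  | succ fuel ih =>
    intro g s hg hgs hrem
    have hrem' : remC genes s ≤ fuel := Nat.lt_succ_iff.mp hrem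
    have hstep : ∀ (T : PySem.Set String) (n : String), n ∈ genes →
        (s <+: T ∧ ∀ x ∈ T, x ∉ s → x ∈ genes ∧ ∀ y, y ∈ genes → adjK x y → y ∈ T) →
        (s <+: innerF (buildComp genes) fuel T n ∧
          ∀ x ∈ innerF (buildComp genes) fuel T n, x ∉ s →
            x ∈ genes ∧ ∀ y, y ∈ genes → adjK x y → y ∈ innerF (buildComp genes) fuel T n) := by
      rintro T n hng ⟨hpfxT, hPhi⟩
      unfold innerF
      by_cases hnT : n ∈ T
      · simp only [hnT, if_true]
        exact ⟨hpfxT, hPhi⟩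
      · simp only [hnT, if_false]
        have haddpfx : T <+: PySem.Set.add T n := by
          rw [PySem.Set.add_of_not_mem hnT]; exact List.prefix_append _ _
        have hu := dfsA_pfx (buildComp genes) fuel n (PySem.Set.add T n)
        have hTu : ∀ z ∈ T, z ∈ dfsA (buildComp genes) fuel n (PySem.Set.add T n) :=
          fun z hz => hu.subset (haddpfx.subset hz)
        refine ⟨(hpfxT.trans haddpfx).trans hu, ?_⟩
        intro x hx hxs
        have hremn : remC genes (PySem.Set.add T n) < fuel := by
          have h1 : remC genes T ≤ remC genes s := remC_anti (fun z hz => hpfxT.subset hz)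
          have h2 := remC_add_lt (genes := genes) hng hnT
          omega
        have hcl := ih n (PySem.Set.add T n) hng ((PySem.Set.mem_add T n n).mpr (Or.inr rfl)) hremn
        by_cases hxTn : x ∈ PySem.Set.add T n
        · rcases (PySem.Set.mem_add T n x).mp hxTn with hxT | rfl
          · obtain ⟨hxg, hcls⟩ := hPhi x hxT hxs
            exact ⟨hxg, fun y hy hadj => hTu y (hcls y hy hadj)⟩
          · exact ⟨hng, fun y hy hadj => hcl.1 y hy hadj⟩
        · exact hcl.2 x hx hxTn
    have hinv : s <+: dfsA (buildComp genes) (fuel+1) g s ∧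
        ∀ x ∈ dfsA (buildComp genes) (fuel+1) g s, x ∉ s → x ∈ genes ∧
          ∀ y, y ∈ genes → adjK x y → y ∈ dfsA (buildComp genes) (fuel+1) g s := by
      rw [dfsA_succ]
      refine List.foldlRecOn
        (motive := fun T => s <+: T ∧ ∀ x ∈ T, x ∉ s → x ∈ genes ∧
          ∀ y, y ∈ genes → adjK x y → y ∈ T) _ _
        ⟨List.prefix_refl s, fun x hx hxs => absurd hx hxs⟩ ?_
      intro T hT k _
      refine List.foldlRecOn
        (motive := fun T => s <+: T ∧ ∀ x ∈ T, x ∉ s → x ∈ genes ∧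
          ∀ y, y ∈ genes → adjK x y → y ∈ T) _ _ hT ?_
      intro T' hT' n hn
      exact hstep T' n (comp_mem.mp hn).1 hT'
    have hinner_adds : ∀ (l : List String) (t : PySem.Set String) (y : String), y ∈ l →
        y ∈ l.foldl (innerF (buildComp genes) fuel) t := by
      intro l
      induction l with
      | nil => intro t y h; cases h
      | cons n l' ihl =>
        intro t y hy
        rcases List.mem_cons.mp hy with rfl | hyl
        · have h1 : y ∈ innerF (buildComp genes) fuel t y := by
            unfold innerF
            by_cases hyt : y ∈ t
            · simp [hyt]
            · simp only [hyt, if_false]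
              exact (dfsA_pfx _ fuel y _).subset ((PySem.Set.mem_add t y y).mpr (Or.inr rfl))
          rw [List.foldl_cons]
          exact (foldl_pfx (fun t' m _ => innerF_pfx _ fuel t' m)).subset h1
        · rw [List.foldl_cons]
          exact ihl _ y hyl
    have houter : ∀ (L : List (String × String)) (t : PySem.Set String)
        (k0 : String × String) (y : String),
        k0 ∈ L → y ∈ (buildComp genes).getD k0 [] →
        y ∈ L.foldl (fun t k => ((buildComp genes).getD k []).foldl
          (innerF (buildComp genes) fuel) t) t := by
      intro L
      induction L with
      | nil => intro t k0 y h; cases h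
      | cons k L' ihL =>
        intro t k0 y hk0 hy
        rcases List.mem_cons.mp hk0 with rfl | hk0'
        · have h1 : y ∈ ((buildComp genes).getD k0 []).foldl (innerF (buildComp genes) fuel) t :=
            hinner_adds _ t y hy
          rw [List.foldl_cons]
          exact (foldl_pfx (fun t' k' _ =>
            foldl_pfx (fun t'' m _ => innerF_pfx _ fuel t'' m))).subset h1
        · rw [List.foldl_cons]
          exact ihL _ k0 y hk0' hy
    constructor
    · rintro y hy ⟨k, hkg, hky⟩
      rw [dfsA_succ]
      exact houter (keysL g) s k y hkg (comp_mem.mpr ⟨hy, hky⟩)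
    · exact hinv.2

noncomputable def cCount (genes : List String) (P : String → Prop) : List String → Nat
  | [] => 0
  | g :: rest => (@ite Nat (∃ h, P h ∧ conn genes h g) (Classical.propDecidable _) 0 1)
      + cCount genes (fun h => P h ∨ h = g) rest

theorem cCount_cons (genes : List String) (P : String → Prop) (g : String) (rest : List String) :
    cCount genes P (g :: rest)
      = (@ite Nat (∃ h, P h ∧ conn genes h g) (Classical.propDecidable _) 0 1)
        + cCount genes (fun h => P h ∨ h = g) rest := rfl

theorem cCount_congr {genes : List String} {P Q : String → Prop} (hPQ : ∀ h, P h ↔ Q h) :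
    ∀ l, cCount genes P l = cCount genes Q l := by
  intro l
  induction l generalizing P Q with
  | nil => rfl
  | cons g t ih =>
    unfold cCount
    have h1 : (∃ h, P h ∧ conn genes h g) ↔ (∃ h, Q h ∧ conn genes h g) :=
      exists_congr (fun h => and_congr_left' (hPQ h))
    rw [ih (fun h => or_congr (hPQ h) Iff.rfl)]
    by_cases hc : ∃ h, P h ∧ conn genes h g
    · rw [if_pos hc, if_pos (h1.mp hc)]
    · rw [if_neg hc, if_neg (fun hq => hc (h1.mpr hq))]

theorem solveA_fold (genes : List String) :
    ∀ (rest : List String) (P : String → Prop) (seen : PySem.Set String) (ans : Int),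
    (∀ g ∈ rest, g ∈ genes) →
    (∀ x ∈ seen, ∃ h, P h ∧ conn genes h x) →
    (∀ h, P h → ∀ x, conn genes h x → x ∈ seen) →
    (rest.foldl (fun (st : PySem.Set String × Int) gene =>
      if gene ∈ st.1 then st
      else (dfsA (buildComp genes) genes.length gene (PySem.Set.add st.1 gene), st.2 + 1))
      (seen, ans)).2
    = ans + (cCount genes P rest : Int) := by
  intro rest
  induction rest with
  | nil => intro P seen ans _ _ _; simp [cCount]
  | cons g rest ih =>
    intro P seen ans hrest hsnd hcmp
    have hg : g ∈ genes := hrest g (by simp)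
    rw [List.foldl_cons]
    by_cases hgseen : g ∈ seen
    · simp only [hgseen, if_true]
      obtain ⟨h0, hP0, hc0⟩ := hsnd g hgseen
      have hcc : cCount genes P (g :: rest) = cCount genes (fun h => P h ∨ h = g) rest := by
        rw [cCount_cons, if_pos ⟨h0, hP0, hc0⟩]
        simp
      rw [hcc]
      refine ih (fun h => P h ∨ h = g) seen ans (fun x hx => hrest x (by simp [hx]))
        (fun x hx => (hsnd x hx).imp (fun h hh => ⟨Or.inl hh.1, hh.2⟩)) ?_
      rintro h (hPh | rfl) x hcx
      · exact hcmp h hPh x hcx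
      · exact hcmp h0 hP0 x (hc0.trans hcx)
    · simp only [hgseen, if_false]
      have hcond : ¬ ∃ h, P h ∧ conn genes h g :=
        fun ⟨h0, hP0, hc0⟩ => hgseen (hcmp h0 hP0 g hc0)
      have hcc : cCount genes P (g :: rest) = 1 + cCount genes (fun h => P h ∨ h = g) rest := by
        rw [cCount_cons, if_neg hcond]
      have hgadd : g ∈ PySem.Set.add seen g := (PySem.Set.mem_add seen g g).mpr (Or.inr rfl)
      have hsub : ∀ z ∈ seen,
          z ∈ dfsA (buildComp genes) genes.length g (PySem.Set.add seen g) := by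
        intro z hz
        refine (dfsA_pfx _ _ _ _).subset ((PySem.Set.mem_add seen g z).mpr (Or.inl hz))
      have hcl := dfsA_closure genes genes.length g (PySem.Set.add seen g) hg hgadd
        (remC_lt_len hg hgadd)
      have hconn_in : ∀ x, conn genes g x →
          x ∈ dfsA (buildComp genes) genes.length g (PySem.Set.add seen g) := by
        intro x hconn
        induction hconn with
        | refl => exact (dfsA_pfx _ _ _ _).subset hgadd
        | tail hgb hstepbx ihb =>
          rename_i b x'
          obtain ⟨hbg, hxg, hadj⟩ := hstepbx
          by_cases hbseen : b ∈ seen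
          · obtain ⟨h0, hP0, hc0⟩ := hsnd b hbseen
            exact hsub _ (hcmp h0 hP0 x' (hc0.tail ⟨hbg, hxg, hadj⟩))
          · by_cases hbadd : b ∈ PySem.Set.add seen g
            · have hbeq : b = g := by
                rcases (PySem.Set.mem_add seen g b).mp hbadd with h | h
                · exact absurd h hbseen
                · exact h
              subst hbeq
              exact hcl.1 x' hxg hadj
            · exact ((hcl.2 b ihb hbadd).2) x' hxg hadj
      rw [ih (fun h => P h ∨ h = g) _ (ans + 1) (fun x hx => hrest x (by simp [hx])) ?_ ?_]
      · rw [hcc]; push_cast; ring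
      · intro x hx
        rcases dfsA_sound genes genes.length g (PySem.Set.add seen g) hg x hx with hx' | hconn
        · rcases (PySem.Set.mem_add seen g x).mp hx' with hxs | rfl
          · exact ((hsnd x hxs).imp (fun h hh => ⟨Or.inl hh.1, hh.2⟩))
          · exact ⟨_, Or.inr rfl, Relation.ReflTransGen.refl⟩
        · exact ⟨g, Or.inr rfl, hconn⟩
      · rintro h (hPh | rfl) x hcx
        · exact hsub x (hcmp h hPh x hcx)
        · exact hconn_in x hcx

theorem solveA (genes : List String) :
    solve genes = (cCount genes (fun _ => False) genes : Int) := by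
  have h := solveA_fold genes genes (fun _ => False) PySem.Set.empty 0
    (fun g hg => hg) (fun x hx => absurd hx (List.not_mem_nil))
    (fun h hh => absurd hh not_false)
  simpa [solve] using h

def lbl (rep : PySem.Dict String String) (x : String) : String := rep.getD x ""

def GOOD (genes : List String) (rep : PySem.Dict String String) : Prop :=
  rep.keys = PySem.Set.ofList genes ∧ rep.keys.Nodup ∧
  ∀ x ∈ genes, lbl rep x ∈ genes ∧ conn genes x (lbl rep x)

def rep0D (genes : List String) : PySem.Dict String String :=
  genes.foldl (fun d g => d.insert g g) PySem.Dict.empty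

theorem rep0D_keys (genes : List String) : (rep0D genes).keys = PySem.Set.ofList genes := by
  unfold rep0D
  rw [PySem.Dict.keys_foldl_insert genes (fun _ g => g) PySem.Dict.empty]
  rw [show (PySem.Dict.empty : PySem.Dict String String).keys = ([] : PySem.Set String) from rfl]
  rfl

theorem rep0D_nodup (genes : List String) : (rep0D genes).keys.Nodup := by
  rw [rep0D_keys]
  exact PySem.Set.nodup_ofList genes

theorem rep0D_getD : ∀ (xs : List String) (d : PySem.Dict String String) (x : String),
    (x ∈ xs ∨ d.getD x "" = x) → (xs.foldl (fun d g => d.insert g g) d).getD x "" = x := by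
  intro xs
  induction xs with
  | nil =>
    intro d x h
    rcases h with h | h
    · cases h
    · exact h
  | cons g t ih =>
    intro d x h
    rw [List.foldl_cons]
    apply ih
    by_cases hxg : x = g
    · subst hxg
      right
      exact PySem.Dict.getD_insert_self d x x ""
    · rcases h with h | h
      · rcases List.mem_cons.mp h with rfl | h'
        · exact absurd rfl hxg
        · exact Or.inl h'
      · right
        rw [PySem.Dict.getD_insert_of_ne d g "" hxg]
        exact h

theorem GOOD_rep0D (genes : List String) : GOOD genes (rep0D genes) := by
  refine ⟨rep0D_keys genes, rep0D_nodup genes, ?_⟩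
  intro x hx
  have : lbl (rep0D genes) x = x := rep0D_getD genes PySem.Dict.empty x (Or.inl hx)
  rw [this]
  exact ⟨hx, Relation.ReflTransGen.refl⟩

def cls0D (genes : List String) : PySem.Dict String (List String) :=
  genes.foldl (fun d g => d.insert g [g]) PySem.Dict.empty

-- coherence of the class-member lists with the label map
def CINV (genes : List String) (rep : PySem.Dict String String)
    (cls : PySem.Dict String (List String)) : Prop :=
  ∀ l x, x ∈ cls.getD l [] ↔ (x ∈ genes ∧ lbl rep x = l)

theorem clsRelabel_getD : ∀ (L : List String) (rep : PySem.Dict String String) (r x : String),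
    (clsRelabel rep L r).getD x "" = if x ∈ L then r else rep.getD x "" := by
  intro L
  induction L with
  | nil => intro rep r x; simp [clsRelabel]
  | cons k L' ih =>
    intro rep r x
    rw [show clsRelabel rep (k :: L') r = clsRelabel (rep.insert k r) L' r from rfl, ih]
    by_cases hx : x ∈ L'
    · simp [hx]
    · by_cases hxk : x = k
      · subst hxk
        simp [hx, PySem.Dict.getD_insert_self]
      · simp [hx, hxk, PySem.Dict.getD_insert_of_ne rep r "" hxk]

theorem clsRelabel_keys : ∀ (L : List String) (rep : PySem.Dict String String) (r : String),
    (∀ k ∈ L, k ∈ rep.keys) → (clsRelabel rep L r).keys = rep.keys := by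
  intro L
  induction L with
  | nil => intro rep r _; rfl
  | cons k L' ih =>
    intro rep r hL
    have hc : rep.contains k = true := (PySem.Dict.contains_iff_mem_keys rep k).mpr (hL k (by simp))
    have hkeys : (rep.insert k r).keys = rep.keys := PySem.Dict.keys_insert_of_contains rep r hc
    rw [show clsRelabel rep (k :: L') r = clsRelabel (rep.insert k r) L' r from rfl,
      ih (rep.insert k r) r (fun z hz => by rw [hkeys]; exact hL z (by simp [hz])), hkeys]

-- getD after erase (PySem.Dict.erase is a filter on the items list)
theorem getD_erase_self {ν : Type} (d : PySem.Dict String ν) (k : String) (v : ν) :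
    (d.erase k).getD k v = v := by
  unfold PySem.Dict.getD PySem.Dict.get? PySem.Dict.erase
  rw [List.find?_eq_none.mpr]
  · rfl
  · intro p hp
    have := (List.mem_filter.mp hp).2
    simpa using this

theorem getD_erase_of_ne {ν : Type} (d : PySem.Dict String ν) (k l : String) (v : ν)
    (h : l ≠ k) : (d.erase k).getD l v = d.getD l v := by
  unfold PySem.Dict.getD PySem.Dict.get? PySem.Dict.erase
  congr 2
  show List.find? _ (d.items.filter _) = List.find? _ d.items
  induction d.items with
  | nil => rfl
  | cons p t iht =>
    by_cases hp : p.1 = l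
    · have hpk : (!(p.1 == k)) = true := by simp [hp, h]
      rw [List.filter_cons, if_pos hpk]
      rw [List.find?_cons_of_pos, List.find?_cons_of_pos] <;> simp [hp]
    · rw [List.filter_cons]
      by_cases hpk : (!(p.1 == k)) = true
      · rw [if_pos hpk, List.find?_cons_of_neg, List.find?_cons_of_neg, iht] <;> simp [hp]
      · rw [if_neg hpk, List.find?_cons_of_neg, iht]
        simp [hp]

theorem conn_symm {genes : List String} {a b : String} (h : conn genes a b) : conn genes b a :=
  Relation.ReflTransGen.symmetric
    (fun _ _ hr => ⟨hr.2.1, hr.1, hr.2.2.imp (fun _ hk => ⟨hk.2, hk.1⟩)⟩) h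

theorem mergeStep_spec {genes : List String} {rep : PySem.Dict String String}
    {cls : PySem.Dict String (List String)} (hG : GOOD genes rep) (hC : CINV genes rep cls)
    {r g : String} (hr : r ∈ genes) (hgg : g ∈ genes) (hgr : conn genes g r) :
    GOOD genes (mergeStep r (rep, cls) g).1 ∧
    CINV genes (mergeStep r (rep, cls) g).1 (mergeStep r (rep, cls) g).2 ∧
    ((∀ x ∈ genes, lbl (mergeStep r (rep, cls) g).1 x
        = if lbl rep x = lbl rep g then r else lbl rep x)
      ∨ (mergeStep r (rep, cls) g = (rep, cls) ∧ lbl rep g = r)) := by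
  by_cases hne : rep.getD g "" ≠ r
  · have hstep : mergeStep r (rep, cls) g
        = (clsRelabel rep (cls.getD (rep.getD g "") []) r,
           (cls.modify r [] (· ++ cls.getD (rep.getD g "") [])).erase (rep.getD g "")) := by
      unfold mergeStep
      rw [if_pos hne]
    have ho : lbl rep g ≠ r := hne
    have hF : ∀ x ∈ genes, lbl (mergeStep r (rep, cls) g).1 x
        = if lbl rep x = lbl rep g then r else lbl rep x := by
      intro x hx
      rw [hstep]
      show (clsRelabel rep (cls.getD (rep.getD g "") []) r).getD x "" = _
      rw [clsRelabel_getD]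
      by_cases hm : lbl rep x = lbl rep g
      · have hmem : x ∈ cls.getD (rep.getD g "") [] := (hC (rep.getD g "") x).mpr ⟨hx, hm⟩
        simp [hmem, hm]
      · have hmem : x ∉ cls.getD (rep.getD g "") [] :=
          fun hmm => hm ((hC (rep.getD g "") x).mp hmm).2
        simp [hmem, hm]
        rfl
    have hkeys : (mergeStep r (rep, cls) g).1.keys = rep.keys := by
      rw [hstep]
      refine clsRelabel_keys _ rep r (fun k hk => ?_)
      have hkg : k ∈ genes := ((hC (rep.getD g "") k).mp hk).1
      rw [hG.1]
      exact (PySem.Set.mem_ofList genes k).mpr hkg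
    have hGood : GOOD genes (mergeStep r (rep, cls) g).1 := by
      refine ⟨by rw [hkeys]; exact hG.1, by rw [hkeys]; exact hG.2.1, ?_⟩
      intro x hx
      rw [hF x hx]
      by_cases hm : lbl rep x = lbl rep g
      · simp only [hm, if_true]
        have h1 : conn genes x (lbl rep g) := hm ▸ (hG.2.2 x hx).2
        have h2 : conn genes g (lbl rep g) := (hG.2.2 g hgg).2
        exact ⟨hr, (h1.trans (conn_symm h2)).trans hgr⟩
      · simp only [hm, if_false]
        exact hG.2.2 x hx
    refine ⟨hGood, ?_, Or.inl hF⟩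
    intro l x
    have hcls : (mergeStep r (rep, cls) g).2
        = (cls.modify r [] (· ++ cls.getD (rep.getD g "") [])).erase (rep.getD g "") := by
      rw [hstep]
    rw [hcls]
    by_cases hlo : l = rep.getD g ""
    · subst hlo
      rw [getD_erase_self]
      simp only [List.not_mem_nil, false_iff]
      rintro ⟨hx, hlbl⟩
      rw [hF x hx] at hlbl
      by_cases hm : lbl rep x = lbl rep g
      · rw [if_pos hm] at hlbl
        exact ho hlbl.symm
      · rw [if_neg hm] at hlbl
        exact hm hlbl
    · rw [getD_erase_of_ne _ _ _ _ hlo]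
      by_cases hlr : l = r
      · subst hlr
        rw [PySem.Dict.getD_modify_self]
        rw [List.mem_append]
        constructor
        · rintro (hm | hm)
          · obtain ⟨hx, hlb⟩ := (hC l x).mp hm
            refine ⟨hx, ?_⟩
            rw [hF x hx]
            by_cases hmm : lbl rep x = lbl rep g
            · rw [if_pos hmm]
            · rw [if_neg hmm]; exact hlb
          · obtain ⟨hx, hlb⟩ := (hC (rep.getD g "") x).mp hm
            refine ⟨hx, ?_⟩
            rw [hF x hx, if_pos (show lbl rep x = lbl rep g from hlb)]
        · rintro ⟨hx, hlb⟩
          rw [hF x hx] at hlb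
          by_cases hmm : lbl rep x = lbl rep g
          · exact Or.inr ((hC (rep.getD g "") x).mpr ⟨hx, hmm⟩)
          · rw [if_neg hmm] at hlb
            exact Or.inl ((hC l x).mpr ⟨hx, hlb⟩)
      · rw [PySem.Dict.getD_modify_of_ne cls [] _ hlr]
        rw [hC l x]
        constructor
        · rintro ⟨hx, hlb⟩
          refine ⟨hx, ?_⟩
          rw [hF x hx]
          by_cases hmm : lbl rep x = lbl rep g
          · exact absurd (hmm ▸ hlb : lbl rep g = l).symm hlo
          · rw [if_neg hmm]; exact hlb
        · rintro ⟨hx, hlb⟩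
          rw [hF x hx] at hlb
          by_cases hmm : lbl rep x = lbl rep g
          · rw [if_pos hmm] at hlb
            exact absurd hlb.symm hlr
          · rw [if_neg hmm] at hlb
            exact ⟨hx, hlb⟩
  · have hstep : mergeStep r (rep, cls) g = (rep, cls) := by
      unfold mergeStep
      rw [if_neg hne]
    rw [hstep]
    exact ⟨hG, hC, Or.inr ⟨rfl, not_not.mp hne⟩⟩

theorem mergeAux (genes : List String) (r : String) (hr : r ∈ genes) :
    ∀ (rl : List String) (rep : PySem.Dict String String)
      (cls : PySem.Dict String (List String)),
    GOOD genes rep → CINV genes rep cls →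
    (∀ g ∈ rl, g ∈ genes ∧ conn genes g r) →
    GOOD genes (mergeRun (rep, cls) r rl).1 ∧
    CINV genes (mergeRun (rep, cls) r rl).1 (mergeRun (rep, cls) r rl).2 ∧
    (∀ x y, x ∈ genes → y ∈ genes → lbl rep x = lbl rep y →
      lbl (mergeRun (rep, cls) r rl).1 x = lbl (mergeRun (rep, cls) r rl).1 y) ∧
    (∀ x, x ∈ genes → lbl rep x = r → lbl (mergeRun (rep, cls) r rl).1 x = r) ∧
    (∀ g ∈ rl, lbl (mergeRun (rep, cls) r rl).1 g = r) := by
  intro rl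
  induction rl with
  | nil =>
    intro rep cls hG hC _
    exact ⟨hG, hC, fun x y _ _ h => h, fun x _ h => h, fun g hg => absurd hg (List.not_mem_nil)⟩
  | cons g rl' ih =>
    intro rep cls hG hC hrl
    obtain ⟨hgg, hgr⟩ := hrl g (by simp)
    obtain ⟨hG', hC', hdisj⟩ := mergeStep_spec hG hC hr hgg hgr
    have hrun : mergeRun (rep, cls) r (g :: rl')
        = mergeRun ((mergeStep r (rep, cls) g).1, (mergeStep r (rep, cls) g).2) r rl' := by
      rw [Prod.mk.eta]
      rfl
    rw [hrun]
    have hmono : ∀ x y, x ∈ genes → y ∈ genes → lbl rep x = lbl rep y →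
        lbl (mergeStep r (rep, cls) g).1 x = lbl (mergeStep r (rep, cls) g).1 y := by
      rcases hdisj with hF | ⟨he, _⟩
      · intro x y hx hy hxy
        rw [hF x hx, hF y hy, hxy]
      · intro x y _ _ hxy
        rw [he]
        exact hxy
    have hpres : ∀ x, x ∈ genes → lbl rep x = r → lbl (mergeStep r (rep, cls) g).1 x = r := by
      rcases hdisj with hF | ⟨he, _⟩
      · intro x hx hxr
        rw [hF x hx, hxr]
        by_cases hgr' : r = lbl rep g <;> simp [hgr']
      · intro x _ hxr
        rw [he]
        exact hxr
    have hgsets : lbl (mergeStep r (rep, cls) g).1 g = r := by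
      rcases hdisj with hF | ⟨he, h2⟩
      · rw [hF g hgg]
        simp
      · rw [he]
        exact h2
    obtain ⟨c1, c2, c3, c4, c5⟩ := ih (mergeStep r (rep, cls) g).1 (mergeStep r (rep, cls) g).2
      hG' hC' (fun z hz => hrl z (by simp [hz]))
    refine ⟨c1, c2, ?_, ?_, ?_⟩
    · intro x y hx hy hxy
      exact c3 x y hx hy (hmono x y hx hy hxy)
    · intro x hx hxr
      exact c4 x hx (hpres x hx hxr)
    · intro z hz
      rcases List.mem_cons.mp hz with rfl | hz'
      · exact c4 z hgg hgsets
      · exact c5 z hz'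

theorem mergeGroup_good {genes : List String} {rep : PySem.Dict String String}
    {cls : PySem.Dict String (List String)}
    (hG : GOOD genes rep) (hC : CINV genes rep cls) (members : List String)
    (hmem : ∃ k, ∀ g ∈ members, g ∈ genes ∧ k ∈ keysL g) :
    GOOD genes (mergeGroup (rep, cls) members).1 ∧
    CINV genes (mergeGroup (rep, cls) members).1 (mergeGroup (rep, cls) members).2 ∧
    (∀ x y, x ∈ genes → y ∈ genes → lbl rep x = lbl rep y →
      lbl (mergeGroup (rep, cls) members).1 x = lbl (mergeGroup (rep, cls) members).1 y) ∧
    (∀ g ∈ members, ∀ g' ∈ members,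
      lbl (mergeGroup (rep, cls) members).1 g = lbl (mergeGroup (rep, cls) members).1 g') := by
  obtain ⟨k, hk⟩ := hmem
  cases members with
  | nil =>
    exact ⟨hG, hC, fun x y _ _ h => h, fun g hg => absurd hg (List.not_mem_nil)⟩
  | cons m0 rest =>
    obtain ⟨hm0g, hm0k⟩ := hk m0 (by simp)
    have hr : lbl rep m0 ∈ genes ∧ conn genes m0 (lbl rep m0) := hG.2.2 m0 hm0g
    have hrest : ∀ g ∈ rest, g ∈ genes ∧ conn genes g (lbl rep m0) := by
      intro g hg
      obtain ⟨hgg, hgk⟩ := hk g (by simp [hg])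
      refine ⟨hgg, ?_⟩
      have hadj : stepG genes g m0 := ⟨hgg, hm0g, ⟨k, hgk, hm0k⟩⟩
      exact (Relation.ReflTransGen.single hadj).trans hr.2
    obtain ⟨c1, c2, c3, c4, c5⟩ := mergeAux genes (lbl rep m0) hr.1 rest rep cls hG hC hrest
    have hmg : mergeGroup (rep, cls) (m0 :: rest) = mergeRun (rep, cls) (lbl rep m0) rest := rfl
    rw [hmg]
    refine ⟨c1, c2, c3, ?_⟩
    have hall : ∀ g ∈ (m0 :: rest), lbl (mergeRun (rep, cls) (lbl rep m0) rest).1 g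
        = lbl rep m0 := by
      intro g hg
      rcases List.mem_cons.mp hg with rfl | hg'
      · exact c4 g hm0g rfl
      · exact c5 g hg'
    intro g hg g' hg'
    rw [hall g hg, hall g' hg']

theorem merge_fold (genes : List String) :
    ∀ (vl : List (List String)) (rep : PySem.Dict String String)
      (cls : PySem.Dict String (List String)),
    GOOD genes rep → CINV genes rep cls →
    (∀ m ∈ vl, ∃ k, ∀ g ∈ m, g ∈ genes ∧ k ∈ keysL g) →
    GOOD genes (vl.foldl mergeGroup (rep, cls)).1 ∧
    (∀ x y, x ∈ genes → y ∈ genes → lbl rep x = lbl rep y →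
      lbl (vl.foldl mergeGroup (rep, cls)).1 x = lbl (vl.foldl mergeGroup (rep, cls)).1 y) ∧
    (∀ m ∈ vl, ∀ g ∈ m, ∀ g' ∈ m,
      lbl (vl.foldl mergeGroup (rep, cls)).1 g = lbl (vl.foldl mergeGroup (rep, cls)).1 g') := by
  intro vl
  induction vl with
  | nil =>
    intro rep cls hG _ _
    exact ⟨hG, fun x y _ _ h => h, fun m hm => absurd hm (List.not_mem_nil)⟩
  | cons m vl' ih =>
    intro rep cls hG hC hvl
    rw [List.foldl_cons]
    obtain ⟨d1, d2, d3, d4⟩ := mergeGroup_good hG hC m (hvl m (by simp))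
    have heta : vl'.foldl mergeGroup (mergeGroup (rep, cls) m)
        = vl'.foldl mergeGroup
            ((mergeGroup (rep, cls) m).1, (mergeGroup (rep, cls) m).2) := by
      rw [Prod.mk.eta]
    rw [heta]
    obtain ⟨c1, c2, c3⟩ := ih (mergeGroup (rep, cls) m).1 (mergeGroup (rep, cls) m).2
      d1 d2 (fun m' hm' => hvl m' (by simp [hm']))
    refine ⟨c1, ?_, ?_⟩
    · intro x y hx hy hxy
      exact c2 x y hx hy (d3 x y hx hy hxy)
    · intro m' hm' g hg g' hg'
      rcases List.mem_cons.mp hm' with rfl | hm''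
      · obtain ⟨km, hkm⟩ := hvl m' (by simp)
        exact c2 g g' (hkm g hg).1 (hkm g' hg').1 (d4 g hg g' hg')
      · exact c3 m' hm'' g hg g' hg'

theorem cls0D_getD_mem : ∀ (xs : List String) (d : PySem.Dict String (List String)) (x : String),
    (x ∈ xs ∨ d.getD x [] = [x]) → (xs.foldl (fun d g => d.insert g [g]) d).getD x [] = [x] := by
  intro xs
  induction xs with
  | nil =>
    intro d x h
    rcases h with h | h
    · cases h
    · exact h
  | cons g t ih =>
    intro d x h
    rw [List.foldl_cons]
    apply ih
    by_cases hxg : x = g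
    · subst hxg
      right
      exact PySem.Dict.getD_insert_self d x [x] []
    · rcases h with h | h
      · rcases List.mem_cons.mp h with rfl | h'
        · exact absurd rfl hxg
        · exact Or.inl h'
      · right
        rw [PySem.Dict.getD_insert_of_ne d [g] [] hxg]
        exact h

theorem cls0D_getD_not_mem : ∀ (xs : List String) (d : PySem.Dict String (List String))
    (x : String), x ∉ xs → d.getD x [] = [] →
    (xs.foldl (fun d g => d.insert g [g]) d).getD x [] = [] := by
  intro xs
  induction xs with
  | nil => intro d x _ h; exact h
  | cons g t ih =>
    intro d x hx h
    rw [List.foldl_cons]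
    have hxg : x ≠ g := fun e => hx (by simp [e])
    refine ih _ x (fun hxt => hx (by simp [hxt])) ?_
    rw [PySem.Dict.getD_insert_of_ne d [g] [] hxg]
    exact h

theorem CINV0 (genes : List String) : CINV genes (rep0D genes) (cls0D genes) := by
  intro l x
  by_cases hl : l ∈ genes
  · rw [show (cls0D genes).getD l [] = [l] from
      cls0D_getD_mem genes PySem.Dict.empty l (Or.inl hl)]
    constructor
    · intro hx
      rcases List.mem_singleton.mp hx with rfl
      exact ⟨hl, rep0D_getD genes PySem.Dict.empty x (Or.inl hl)⟩
    · rintro ⟨hx, hlbl⟩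
      have : lbl (rep0D genes) x = x := rep0D_getD genes PySem.Dict.empty x (Or.inl hx)
      rw [this] at hlbl
      simp [hlbl]
  · rw [show (cls0D genes).getD l [] = [] from
      cls0D_getD_not_mem genes PySem.Dict.empty l hl rfl]
    simp only [List.not_mem_nil, false_iff]
    rintro ⟨hx, hlbl⟩
    have : lbl (rep0D genes) x = x := rep0D_getD genes PySem.Dict.empty x (Or.inl hx)
    rw [this] at hlbl
    exact hl (hlbl ▸ hx)

def repF (genes : List String) : PySem.Dict String String :=
  (((buildComp (rep0D genes).keys).values).foldl mergeGroup (rep0D genes, cls0D genes)).1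

theorem buckets_values (genes : List String) :
    (buildComp (rep0D genes).keys).values
      = (buildComp (rep0D genes).keys).keys.map
          (fun k => (buildComp (rep0D genes).keys).getD k []) := by
  have h := PySem.Dict.items_eq_map_keys (buildComp (rep0D genes).keys)
    (comp_keys_nodup _) ([] : List String)
  show (buildComp (rep0D genes).keys).items.map (·.2) = _
  rw [h, List.map_map]
  rfl

theorem buckets_mem_ok (genes : List String) :
    ∀ m ∈ (buildComp (rep0D genes).keys).values, ∃ k, ∀ g ∈ m, g ∈ genes ∧ k ∈ keysL g := by
  intro m hm
  rw [buckets_values] at hm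
  obtain ⟨k, _, rfl⟩ := List.mem_map.mp hm
  refine ⟨k, fun g hg => ?_⟩
  obtain ⟨hgk, hkg⟩ := comp_mem.mp hg
  rw [rep0D_keys] at hgk
  exact ⟨(PySem.Set.mem_ofList genes g).mp hgk, hkg⟩

theorem repF_spec (genes : List String) :
    GOOD genes (repF genes) ∧
    ∀ x y, x ∈ genes → y ∈ genes → (lbl (repF genes) x = lbl (repF genes) y ↔ conn genes x y) := by
  obtain ⟨hGf, hmono, hgroups⟩ := merge_fold genes ((buildComp (rep0D genes).keys).values)
    (rep0D genes) (cls0D genes) (GOOD_rep0D genes) (CINV0 genes) (buckets_mem_ok genes)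
  rw [show (List.foldl mergeGroup ((rep0D genes), (cls0D genes))
        (buildComp (rep0D genes).keys).values).1
      = repF genes from rfl] at hGf hgroups
  refine ⟨hGf, fun x y hx hy => ⟨?_, ?_⟩⟩
  · intro hlbl
    have h1 := (hGf.2.2 x hx).2
    have h2 := (hGf.2.2 y hy).2
    rw [hlbl] at h1
    exact h1.trans (conn_symm h2)
  · intro hconn
    induction hconn with
    | refl => rfl
    | tail hxb hbc ihb =>
      rename_i b c
      obtain ⟨hbg, hcg, ⟨k, hkb, hkc⟩⟩ := hbc
      have hkmem : k ∈ (buildComp (rep0D genes).keys).keys :=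
        comp_keys_mem.mpr ⟨b, by rw [rep0D_keys]; exact (PySem.Set.mem_ofList genes b).mpr hbg, hkb⟩
      have hbmem : b ∈ (buildComp (rep0D genes).keys).getD k [] :=
        comp_mem.mpr ⟨by rw [rep0D_keys]; exact (PySem.Set.mem_ofList genes b).mpr hbg, hkb⟩
      have hcmem : c ∈ (buildComp (rep0D genes).keys).getD k [] :=
        comp_mem.mpr ⟨by rw [rep0D_keys]; exact (PySem.Set.mem_ofList genes c).mpr hcg, hkc⟩
      have hmval : (buildComp (rep0D genes).keys).getD k []
          ∈ (buildComp (rep0D genes).keys).values := by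
        rw [buckets_values]
        exact List.mem_map.mpr ⟨k, hkmem, rfl⟩
      have hbc' : lbl (repF genes) b = lbl (repF genes) c :=
        hgroups _ hmval b hbmem c hcmem
      exact (ihb hbg).trans hbc'

theorem solveB (genes : List String) :
    solve_alt genes
      = ((PySem.Set.ofList ((PySem.Set.ofList genes).map (lbl (repF genes)))).length : Int) := by
  have hG := (repF_spec genes).1
  have hvals : (repF genes).values = (PySem.Set.ofList genes).map (lbl (repF genes)) := by
    have h := PySem.Dict.items_eq_map_keys (repF genes) hG.2.1 ""
    show (repF genes).items.map (·.2) = _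
    rw [h, List.map_map, hG.1]
    rfl
  have h0 : solve_alt genes = ((PySem.Set.ofList (repF genes).values).length : Int) := rfl
  rw [h0, hvals]

theorem cnt (genes : List String) :
    ∀ (l : List String) (P : String → Prop) (s : PySem.Set String),
    (∀ h, P h → h ∈ genes) → (∀ g ∈ l, g ∈ genes) →
    (∀ v, v ∈ s ↔ ∃ h, P h ∧ lbl (repF genes) h = v) →
    (PySem.Set.update s (l.map (lbl (repF genes)))).length = s.length + cCount genes P l := by
  intro l
  induction l with
  | nil =>
    intro P s _ _ _
    rw [List.map_nil, PySem.Set.update_nil]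
    simp [cCount]
  | cons g l' ih =>
    intro P s hP hl hs
    have hg := hl g (by simp)
    rw [List.map_cons, PySem.Set.update_cons]
    by_cases hv : lbl (repF genes) g ∈ s
    · obtain ⟨h0, hP0, hl0⟩ := (hs _).mp hv
      have hcond : ∃ h, P h ∧ conn genes h g :=
        ⟨h0, hP0, ((repF_spec genes).2 h0 g (hP h0 hP0) hg).mp hl0⟩
      rw [PySem.Set.add_of_mem hv, cCount_cons, if_pos hcond]
      rw [ih (fun h => P h ∨ h = g) s
        (fun h hh => hh.elim (hP h) (fun e => e ▸ hg))
        (fun z hz => hl z (by simp [hz])) ?_]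
      · omega
      · intro v
        rw [hs v]
        constructor
        · rintro ⟨h1, hP1, hl1⟩
          exact ⟨h1, Or.inl hP1, hl1⟩
        · rintro ⟨h1, hP1 | rfl, hl1⟩
          · exact ⟨h1, hP1, hl1⟩
          · exact (hs v).mp (hl1 ▸ hv)
    · have hcond : ¬ ∃ h, P h ∧ conn genes h g := by
        rintro ⟨h0, hP0, hc0⟩
        exact hv ((hs _).mpr ⟨h0, hP0, ((repF_spec genes).2 h0 g (hP h0 hP0) hg).mpr hc0⟩)
      rw [PySem.Set.add_of_not_mem hv, cCount_cons, if_neg hcond]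
      rw [ih (fun h => P h ∨ h = g) (s ++ [lbl (repF genes) g])
        (fun h hh => hh.elim (hP h) (fun e => e ▸ hg))
        (fun z hz => hl z (by simp [hz])) ?_]
      · rw [List.length_append]
        simp
        omega
      · intro v
        rw [List.mem_append, List.mem_singleton, hs v]
        constructor
        · rintro (⟨h1, hP1, hl1⟩ | rfl)
          · exact ⟨h1, Or.inl hP1, hl1⟩
          · exact ⟨g, Or.inr rfl, rfl⟩
        · rintro ⟨h1, hP1 | rfl, hl1⟩
          · exact Or.inl ⟨h1, hP1, hl1⟩
          · exact Or.inr hl1.symm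

theorem cc_set (genes : List String) :
    ∀ (l : List String) (P : String → Prop) (s : PySem.Set String),
    (∀ x, x ∈ s ↔ P x) →
    cCount genes P l
      = cCount genes P ((PySem.Set.ofList l).filter (fun y => !(PySem.Set.contains s y))) := by
  intro l
  induction l with
  | nil => intro P s _; rw [PySem.Set.ofList_nil]; rfl
  | cons g l' ih =>
    intro P s hs
    rw [PySem.Set.ofList_cons, List.filter_cons]
    by_cases hgP : P g
    · have hgs : g ∈ s := (hs g).mpr hgP
      have hcg : PySem.Set.contains s g = true := (PySem.Set.contains_iff s g).mpr hgs
      simp only [hcg, Bool.not_true, if_false, Bool.false_eq_true]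
      have hdf : ((PySem.Set.ofList l').discard g).filter (fun y => !(PySem.Set.contains s y))
          = (PySem.Set.ofList l').filter (fun y => !(PySem.Set.contains s y)) := by
        unfold PySem.Set.discard
        rw [List.filter_filter]
        refine List.filter_congr (fun y _ => ?_)
        by_cases hyg : y = g
        · subst hyg
          simp [hgs]
        · simp [hyg]
      rw [hdf]
      have hcond : ∃ h, P h ∧ conn genes h g := ⟨g, hgP, Relation.ReflTransGen.refl⟩
      rw [cCount_cons, if_pos hcond]
      rw [cCount_congr (fun h => or_iff_left_of_imp (fun e : h = g => e ▸ hgP)) l']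
      rw [ih P s hs]
      omega
    · have hgs : g ∉ s := fun h => hgP ((hs g).mp h)
      have hcg : PySem.Set.contains s g = false := by
        by_cases h : PySem.Set.contains s g = true
        · exact absurd ((PySem.Set.contains_iff s g).mp h) hgs
        · simpa using h
      simp only [hcg, Bool.not_false, if_true]
      rw [cCount_cons, cCount_cons]
      congr 1
      have hdf : ((PySem.Set.ofList l').discard g).filter (fun y => !(PySem.Set.contains s y))
          = (PySem.Set.ofList l').filter (fun y => !(PySem.Set.contains (PySem.Set.add s g) y)) := by
        unfold PySem.Set.discard
        rw [List.filter_filter]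
        refine List.filter_congr (fun y _ => ?_)
        by_cases hyg : y = g
        · subst hyg
          have h2 : y ∈ PySem.Set.add s y := (PySem.Set.mem_add s y y).mpr (Or.inr rfl)
          simp [h2]
        · by_cases hys : y ∈ s
          · have h2 : y ∈ PySem.Set.add s g := (PySem.Set.mem_add s g y).mpr (Or.inl hys)
            simp [hys, h2]
          · have h1 : PySem.Set.contains s y = false := by
              by_cases h : PySem.Set.contains s y = true
              · exact absurd ((PySem.Set.contains_iff s y).mp h) hys
              · simpa using h
            have h2 : PySem.Set.contains (PySem.Set.add s g) y = false := by
              by_cases h : PySem.Set.contains (PySem.Set.add s g) y = true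
              · rcases (PySem.Set.mem_add s g y).mp ((PySem.Set.contains_iff _ y).mp h) with h' | h'
                · exact absurd h' hys
                · exact absurd h' hyg
              · simpa using h
            simp only [h1, h2]
            simp [hyg]
      rw [hdf]
      refine ih (fun h => P h ∨ h = g) (PySem.Set.add s g) (fun x => ?_)
      rw [PySem.Set.mem_add]
      exact or_congr (hs x) Iff.rfl

theorem final_eq (genes : List String) : solve genes = solve_alt genes := by
  rw [solveA genes, solveB genes]
  congr 1
  have h2 := cc_set genes genes (fun _ => False) [] (fun x => by simp)
  have hfilter : ((PySem.Set.ofList genes).filter (fun y => !(PySem.Set.contains [] y)))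
      = PySem.Set.ofList genes := by
    refine List.filter_congr (fun y _ => ?_) |>.trans (List.filter_true _)
    simp [PySem.Set.contains_eq_listContains]
  rw [hfilter] at h2
  have h1 := cnt genes (PySem.Set.ofList genes) (fun _ => False) []
    (fun h hf => absurd hf not_false)
    (fun g hg => (PySem.Set.mem_ofList genes g).mp hg)
    (fun v => by simp)
  have hupd : PySem.Set.update ([] : PySem.Set String)
      ((PySem.Set.ofList genes).map (lbl (repF genes)))
      = PySem.Set.ofList ((PySem.Set.ofList genes).map (lbl (repF genes))) :=
    PySem.Set.update_empty _
  rw [hupd] at h1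
  rw [h2]
  simp only [List.length_nil, Nat.zero_add] at h1
  exact h1.symm


-- ===== VERDICT (by name: the statement is the Claim_ definition above) =====
theorem solve_spec : Claim_equal_solve := by
  intro genes _
  unfold Spec_solve
  exact final_eq genes
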